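-- pv_equiv track=rewrite | github.com/YOOHOYOUNG/shopee | shopee_calculator_v1_0.py | calculate_updated_shipping_fee
-- ===== SOURCE A (Python) =====
-- updated_shipping_fee_structure = {
--     'Singapore': [
--         (500, 5000), (1000, 7000), (1500, 9000),
--         (2000, 11000), (2500, 13000), (3000, 15000),
--         ('above', 2000)
--     ],
--     'Malaysia': [
--         (500, 5500), (1000, 7500), (1500, 9500),
--         (2000, 11500), (2500, 13500), (3000, 15500),
--         ('above', 2000)
--     ],
--     'Philippines': [
--         (500, 7000), (1000, 9000), (1500, 11000),
--         (2000, 13000), (2500, 15000), (3000, 17000),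
--         ('above', 2000)
--     ],
--     'Thailand': [
--         (500, 6000), (1000, 8000), (1500, 10000),
--         (2000, 12000), (2500, 14000), (3000, 16000),
--         ('above', 2000)
--     ],
--     'Vietnam': [
--         (500, 6500), (1000, 8500), (1500, 10500),
--         (2000, 12500), (2500, 14500), (3000, 16500),
--         ('above', 2000)
--     ],
--     'Indonesia': [
--         (500, 7500), (1000, 9500), (1500, 11500),
--         (2000, 13500), (2500, 15500), (3000, 17500),
--         ('above', 2000)
--     ],
--     'Taiwan': [
--         (500, 5500), (1000, 7500), (1500, 9500),
--         (2000, 11500), (2500, 13500), (3000, 15500),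
--         ('above', 2000)
--     ],
--     'Brazil': [
--         (500, 15000), (1000, 20000), (1500, 25000),
--         (2000, 30000), (2500, 35000), (3000, 40000),
--         ('above', 5000)
--     ]
-- }
--
-- def calculate_updated_shipping_fee(country, weight):
--     """업데이트된 국가와 무게에 따른 배송비 계산."""
--     fees = updated_shipping_fee_structure[country]
--     for limit, fee in fees:
--         if limit == 'above':
--             additional_weight = max(0, weight - 3000)
--             additional_fee = ((additional_weight // 500) + 1) * fee
--             return fees[-2][1] + additional_fee
--         if weight <= limit:
--             return fee
--     return fees[-1][1]
-- ===== SOURCE B (Python) =====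
-- # Each country's table is an arithmetic progression: fee = base + step*tier,
-- # where step equals the 'above' surcharge unit. So compute the tier index
-- # arithmetically (ceiling division) instead of scanning the tiers.
-- UPDATED_RATES = {
--     'Singapore': (5000, 2000),
--     'Malaysia': (5500, 2000),
--     'Philippines': (7000, 2000),
--     'Thailand': (6000, 2000),
--     'Vietnam': (6500, 2000),
--     'Indonesia': (7500, 2000),
--     'Taiwan': (5500, 2000),
--     'Brazil': (15000, 5000),
-- }
--
-- def calculate_updated_shipping_fee(country, weight):
--     base, step = UPDATED_RATES[country]
--     if weight <= 3000:
--         k = max(0, -(-weight // 500) - 1)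
--     else:
--         k = 6 + (weight - 3000) // 500
--     return base + step * k
-- ===== Notes on version B (the rewrite author's own statement) =====
-- stated objective: simpler
-- what changed: Replaces the linear scan over the per-country tier list with a closed-form computation: each country's table is an arithmetic progression base + step*tier, so B stores only (base, step) per country and computes the tier by ceiling division; no tier list and no loop remain.
import Mathlib
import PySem

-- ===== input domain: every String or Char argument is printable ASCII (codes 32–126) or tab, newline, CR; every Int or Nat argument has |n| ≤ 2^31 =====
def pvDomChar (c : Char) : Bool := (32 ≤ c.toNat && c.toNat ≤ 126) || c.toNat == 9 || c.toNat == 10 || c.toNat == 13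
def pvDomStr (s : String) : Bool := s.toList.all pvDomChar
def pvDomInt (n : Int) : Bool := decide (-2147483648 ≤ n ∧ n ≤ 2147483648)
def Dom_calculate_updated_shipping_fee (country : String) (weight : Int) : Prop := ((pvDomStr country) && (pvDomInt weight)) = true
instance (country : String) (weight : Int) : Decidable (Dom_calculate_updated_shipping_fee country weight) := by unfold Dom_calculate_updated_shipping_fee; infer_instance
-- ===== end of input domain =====

-- B replaces the tier scan with a closed form: each table is an arithmetic progression
-- base + step*tier, so B looks up (base, step) and computes the tier by ceiling division.

-- ===== PORT A =====
-- tier limit: Python's int limit → some n, the string 'above' → none (exact encoding of the mixed tuple)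
-- dict → association list (first match); lookup helper:
def pvLookup {α : Type} : List (String × α) → String → Option α
  | [], _ => none
  | (k, v) :: rest, key => if k == key then some v else pvLookup rest key

def pvTable : List (String × List (Option Int × Int)) :=
  [ ("Singapore",   [(some 500, 5000), (some 1000, 7000), (some 1500, 9000),
                     (some 2000, 11000), (some 2500, 13000), (some 3000, 15000), (none, 2000)]),
    ("Malaysia",    [(some 500, 5500), (some 1000, 7500), (some 1500, 9500),
                     (some 2000, 11500), (some 2500, 13500), (some 3000, 15500), (none, 2000)]),
    ("Philippines", [(some 500, 7000), (some 1000, 9000), (some 1500, 11000),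
                     (some 2000, 13000), (some 2500, 15000), (some 3000, 17000), (none, 2000)]),
    ("Thailand",    [(some 500, 6000), (some 1000, 8000), (some 1500, 10000),
                     (some 2000, 12000), (some 2500, 14000), (some 3000, 16000), (none, 2000)]),
    ("Vietnam",     [(some 500, 6500), (some 1000, 8500), (some 1500, 10500),
                     (some 2000, 12500), (some 2500, 14500), (some 3000, 16500), (none, 2000)]),
    ("Indonesia",   [(some 500, 7500), (some 1000, 9500), (some 1500, 11500),
                     (some 2000, 13500), (some 2500, 15500), (some 3000, 17500), (none, 2000)]),
    ("Taiwan",      [(some 500, 5500), (some 1000, 7500), (some 1500, 9500),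
                     (some 2000, 11500), (some 2500, 13500), (some 3000, 15500), (none, 2000)]),
    ("Brazil",      [(some 500, 15000), (some 1000, 20000), (some 1500, 25000),
                     (some 2000, 30000), (some 2500, 35000), (some 3000, 40000), (none, 5000)]) ]

-- the 'for limit, fee in fees:' loop, step for step
def pvLoopA (fees : List (Option Int × Int)) (weight : Int) :
    List (Option Int × Int) → Int
  | [] => ((PySem.List.pyGet? fees (-1)).map Prod.snd).getD 0   -- 'return fees[-1][1]'
  | (limit, fee) :: rest =>
    match limit with
    | none =>
      let additional_weight := max 0 (weight - 3000)
      let additional_fee := (PySem.Int.floordiv additional_weight 500 + 1) * fee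
      ((PySem.List.pyGet? fees (-2)).map Prod.snd).getD 0 + additional_fee
    | some limit => if weight ≤ limit then fee else pvLoopA fees weight rest

def calculate_updated_shipping_fee (country : String) (weight : Int) : Int :=
  let fees := (pvLookup pvTable country).getD []   -- KeyError (missing country) excluded by Pre_
  pvLoopA fees weight fees

-- ===== PORT B =====
def pvRates : List (String × (Int × Int)) :=
  [ ("Singapore", (5000, 2000)), ("Malaysia", (5500, 2000)), ("Philippines", (7000, 2000)),
    ("Thailand", (6000, 2000)), ("Vietnam", (6500, 2000)), ("Indonesia", (7500, 2000)),
    ("Taiwan", (5500, 2000)), ("Brazil", (15000, 5000)) ]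

def calculate_updated_shipping_fee_alt (country : String) (weight : Int) : Int :=
  let bs := (pvLookup pvRates country).getD (0, 0)   -- KeyError excluded by Pre_
  let base := bs.1
  let step := bs.2
  let k : Int :=
    if weight ≤ 3000 then max 0 (-(PySem.Int.floordiv (-weight) 500) - 1)
    else 6 + PySem.Int.floordiv (weight - 3000) 500
  base + step * k

-- ===== PRECONDITION & SPEC =====
-- Pre_ excludes exactly the countries not in the table, where Python A raises KeyError.
def Pre_calculate_updated_shipping_fee (country : String) (weight : Int) : Prop :=
  country ∈ ["Singapore", "Malaysia", "Philippines", "Thailand", "Vietnam", "Indonesia", "Taiwan", "Brazil"]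
instance (country : String) (weight : Int) : Decidable (Pre_calculate_updated_shipping_fee country weight) := by
  unfold Pre_calculate_updated_shipping_fee; infer_instance

def pvWitness_calculate_updated_shipping_fee : String × Int := ("Singapore", 1200)

def Spec_calculate_updated_shipping_fee (country : String) (weight : Int) (out : Int) : Prop := out = calculate_updated_shipping_fee_alt country weight
instance (country : String) (weight : Int) (out : Int) : Decidable (Spec_calculate_updated_shipping_fee country weight out) := by unfold Spec_calculate_updated_shipping_fee; infer_instance

-- ===== CLAIM (what is proved, stated in full; the proofs are below) =====
def Claim_equal_calculate_updated_shipping_fee : Prop := ∀ (country : String) (weight : Int), Dom_calculate_updated_shipping_fee country weight → Pre_calculate_updated_shipping_fee country weight → Spec_calculate_updated_shipping_fee country weight (calculate_updated_shipping_fee country weight)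

-- ===== LEMMAS AND PROOFS =====

-- ===== VERDICT (by name: the statement is the Claim_ definition above) =====
theorem calculate_updated_shipping_fee_spec : Claim_equal_calculate_updated_shipping_fee := by
  intro country weight _ hpre
  unfold Pre_calculate_updated_shipping_fee at hpre
  unfold Spec_calculate_updated_shipping_fee
  simp only [List.mem_cons, List.not_mem_nil, or_false] at hpre
  rcases hpre with rfl | rfl | rfl | rfl | rfl | rfl | rfl | rfl <;>
  · simp [calculate_updated_shipping_fee, calculate_updated_shipping_fee_alt,
      pvTable, pvRates, pvLoopA, pvLookup, PySem.List.pyGet?, PySem.List.pyIdx?]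
    split_ifs <;> omega
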